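-- pv_equiv track=rewrite | github.com/socathie/CodeFights | Tournaments/maximalAllowableSubarrays.py | maximalAllowableSubarrays
-- ===== SOURCE A (Python) =====
-- def maximalAllowableSubarrays(inputArray, maxSum):
--     sol = []
--     for i in range(len(inputArray)):
--         j = i
--         while sum(inputArray[i:j+1])<=maxSum and j<len(inputArray):
--             j += 1
--         sol.append(j-1)
--     return sol
-- ===== SOURCE B (Python) =====
-- def maximalAllowableSubarrays(inputArray, maxSum):
--     # Prefix sums built once: each window sum is an O(1) difference,
--     # so the repeated O(n) summation of A disappears.
--     pre = [0]
--     for x in inputArray: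
--         pre.append(pre[-1] + x)
--     n = len(inputArray)
--     return [next((j for j in range(i, n) if pre[j + 1] - pre[i] > maxSum), n) - 1
--             for i in range(n)]
-- ===== Notes on version B (the rewrite author's own statement) =====
-- stated objective: faster
-- what changed: B builds a prefix-sum table once and, for each start index, finds the first index whose window sum (computed as an O(1) prefix difference) exceeds maxSum, instead of A's re-summing the slice from scratch on every step of the inner while loop.
import Mathlib
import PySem

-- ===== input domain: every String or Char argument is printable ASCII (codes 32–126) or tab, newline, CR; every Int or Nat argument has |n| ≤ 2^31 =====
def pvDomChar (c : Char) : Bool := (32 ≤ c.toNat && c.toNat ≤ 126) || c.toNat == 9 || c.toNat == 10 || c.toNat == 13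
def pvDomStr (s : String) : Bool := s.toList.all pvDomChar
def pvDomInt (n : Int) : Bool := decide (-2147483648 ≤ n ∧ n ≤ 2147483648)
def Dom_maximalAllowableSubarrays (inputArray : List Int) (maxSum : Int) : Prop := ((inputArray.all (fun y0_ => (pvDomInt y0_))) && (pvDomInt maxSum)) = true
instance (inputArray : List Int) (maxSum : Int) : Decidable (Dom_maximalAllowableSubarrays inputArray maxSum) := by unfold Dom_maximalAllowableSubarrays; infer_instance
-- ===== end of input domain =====

-- B replaces A's per-step re-summation of each slice with a prefix-sum table built once; same return values.


-- ===== PORT A =====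
-- inner loop 'while sum(inputArray[i:j+1]) <= maxSum and j < len(inputArray): j += 1' then 'j - 1';
-- fuel = len+1-i bounds the iterations (j only grows to len, where the guard's 'j < len' fails)
def pvAwhile (arr : List Int) (maxSum : Int) (i j : Nat) (fuel : Nat) : Int :=
  match fuel with
  | 0 => (j : Int) - 1
  | fuel + 1 =>
    if (PySem.List.slice arr (some (i : Int)) (some ((j : Int) + 1))).foldl (· + ·) 0 ≤ maxSum
        ∧ j < arr.length then
      pvAwhile arr maxSum i (j + 1) fuel
    else (j : Int) - 1

def maximalAllowableSubarrays (inputArray : List Int) (maxSum : Int) : List Int :=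
  (List.range inputArray.length).foldl
    (fun sol i => sol ++ [pvAwhile inputArray maxSum i i (inputArray.length + 1 - i)]) []

-- ===== PORT B =====
-- pre = [0]; for x in inputArray: pre.append(pre[-1] + x)
def pvPrefix (inputArray : List Int) : List Int :=
  inputArray.foldl (fun pre x => pre ++ [pre.getLast! + x]) [0]

-- 'next((j for j in range(i, n) if pre[j+1]-pre[i] > maxSum), n) - 1' for each i in range(n);
-- the indices j+1 and i are always in range of pre (length n+1), so getD is exact Python indexing here
def maximalAllowableSubarrays_alt (inputArray : List Int) (maxSum : Int) : List Int :=
  let pre := pvPrefix inputArray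
  let n := inputArray.length
  (List.range n).map (fun i =>
    (((List.range' i (n - i)).find?
        (fun j => decide (pre.getD (j + 1) 0 - pre.getD i 0 > maxSum))).getD n : Int) - 1)

-- ===== PRECONDITION & SPEC =====
def Spec_maximalAllowableSubarrays (inputArray : List Int) (maxSum : Int) (out : List Int) : Prop := out = maximalAllowableSubarrays_alt inputArray maxSum
instance (inputArray : List Int) (maxSum : Int) (out : List Int) : Decidable (Spec_maximalAllowableSubarrays inputArray maxSum out) := by unfold Spec_maximalAllowableSubarrays; infer_instance

-- ===== CLAIM (what is proved, stated in full; the proofs are below) =====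
def Claim_equal_maximalAllowableSubarrays : Prop := ∀ (inputArray : List Int) (maxSum : Int), Dom_maximalAllowableSubarrays inputArray maxSum → Spec_maximalAllowableSubarrays inputArray maxSum (maximalAllowableSubarrays inputArray maxSum)

-- ===== LEMMAS AND PROOFS =====

theorem pv_sum_foldl (l : List Int) (a : Int) : l.foldl (· + ·) a = a + l.sum := by
  simpa using PySem.List.foldl_add l id a

theorem pv_getLastBang_concat (l : List Int) (a : Int) : (l ++ [a]).getLast! = a := by
  rw [List.getLast!_eq_getLast?_getD, List.getLast?_concat]; rfl

theorem pv_foldl_append_map {α β : Type} (f : α → β) (l : List α) (acc : List β) :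
    l.foldl (fun s i => s ++ [f i]) acc = acc ++ l.map f := by
  induction l generalizing acc with
  | nil => simp
  | cons x xs ih => simp [List.foldl, ih, List.append_assoc]

theorem pvPrefix_foldl (arr l : List Int) (a : Int) :
    arr.foldl (fun pre x => pre ++ [pre.getLast! + x]) (l ++ [a])
      = l ++ List.scanl (· + ·) a arr := by
  induction arr generalizing l a with
  | nil => simp [List.scanl]
  | cons x xs ih =>
    rw [List.foldl_cons, pv_getLastBang_concat, ih (l ++ [a]) (a + x)]
    simp [List.scanl]

theorem pvPrefix_eq_scanl (arr : List Int) :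
    pvPrefix arr = List.scanl (· + ·) 0 arr := by
  simpa [pvPrefix] using pvPrefix_foldl arr [] 0

theorem pv_scanl_getD (arr : List Int) (s : Int) (k : Nat) (hk : k ≤ arr.length) :
    (List.scanl (· + ·) s arr).getD k 0 = s + (arr.take k).sum := by
  induction arr generalizing s k with
  | nil =>
    have : k = 0 := by simpa using hk
    subst this; simp [List.scanl]
  | cons x xs ih =>
    cases k with
    | zero => simp [List.scanl]
    | succ k =>
      rw [List.scanl_cons]
      have : (s :: List.scanl (· + ·) (s + x) xs).getD (k + 1) 0
          = (List.scanl (· + ·) (s + x) xs).getD k 0 := by simp [List.getD]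
      rw [this, ih (s + x) k (by simpa using hk)]
      simp [List.take_succ_cons]; ring

theorem pv_prefix_getD (arr : List Int) (k : Nat) (hk : k ≤ arr.length) :
    (pvPrefix arr).getD k 0 = (arr.take k).sum := by
  rw [pvPrefix_eq_scanl, pv_scanl_getD arr 0 k hk]; ring

-- window sum as a prefix-sum difference
theorem pv_slice_sum (arr : List Int) (i j : Nat) (hij : i ≤ j) (hj : j + 1 ≤ arr.length) :
    (PySem.List.slice arr (some (i : Int)) (some ((j : Int) + 1))).foldl (· + ·) 0
      = (pvPrefix arr).getD (j + 1) 0 - (pvPrefix arr).getD i 0 := by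
  have h1 : ((j : Int) + 1) = ((j + 1 : Nat) : Int) := by push_cast; ring
  rw [h1, PySem.List.slice_natCast, pv_sum_foldl,
      pv_prefix_getD arr (j + 1) hj, pv_prefix_getD arr i (by omega)]
  have h2 : arr.take (j + 1) = arr.take i ++ (arr.drop i).take (j + 1 - i) := by
    rw [← List.take_add]; congr 1; omega
  rw [h2, List.sum_append]; ring

-- the inner while loop computes B's 'first j in range(i,n) with pre[j+1]-pre[i] > maxSum, default n' minus 1
theorem pv_loop_eq (arr : List Int) (maxSum : Int) (i : Nat) (_hi : i ≤ arr.length) :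
    ∀ (fuel j : Nat), i ≤ j → j ≤ arr.length → arr.length - j < fuel →
    pvAwhile arr maxSum i j fuel
      = (((List.range' j (arr.length - j)).find?
          (fun j' => decide ((pvPrefix arr).getD (j' + 1) 0 - (pvPrefix arr).getD i 0 > maxSum))).getD
          arr.length : Int) - 1 := by
  intro fuel
  induction fuel with
  | zero => intro j _ _ h; omega
  | succ fuel ih =>
    intro j hij hj hfuel
    rw [pvAwhile]
    by_cases hjn : j < arr.length
    · have hrange : List.range' j (arr.length - j)
          = j :: List.range' (j + 1) (arr.length - (j + 1)) := by
        have : arr.length - j = (arr.length - (j + 1)) + 1 := by omega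
        rw [this, List.range'_succ]
      rw [pv_slice_sum arr i j hij (by omega), hrange, List.find?_cons]
      by_cases hcond : (pvPrefix arr).getD (j + 1) 0 - (pvPrefix arr).getD i 0 > maxSum
      · have hd : decide ((pvPrefix arr).getD (j + 1) 0 - (pvPrefix arr).getD i 0 > maxSum) = true :=
          decide_eq_true hcond
        rw [if_neg (fun h => absurd h.1 (by omega)), hd]
        simp
      · have hd : decide ((pvPrefix arr).getD (j + 1) 0 - (pvPrefix arr).getD i 0 > maxSum) = false := by
          simpa using hcond
        rw [if_pos ⟨by omega, hjn⟩, hd]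
        exact ih (j + 1) (by omega) (by omega) (by omega)
    · have hj' : j = arr.length := by omega
      rw [if_neg (by omega)]
      subst hj'; simp

-- ===== VERDICT (by name: the statement is the Claim_ definition above) =====
theorem maximalAllowableSubarrays_spec : Claim_equal_maximalAllowableSubarrays := by
  intro arr maxSum _
  unfold Spec_maximalAllowableSubarrays maximalAllowableSubarrays maximalAllowableSubarrays_alt
  rw [pv_foldl_append_map, List.nil_append]
  apply List.map_congr_left
  intro i hi
  have hi' : i < arr.length := List.mem_range.mp hi
  exact pv_loop_eq arr maxSum i (by omega) (arr.length + 1 - i) i (le_refl i) (by omega) (by omega)
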